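-- pv_equiv track=rewrite | github.com/jtval/tuned | libexec/defirqaffinity.py | bitmasklist
-- ===== SOURCE A (Python) =====
-- def bitmasklist(line):
-- 	fields = line.strip().split(",")
-- 	bitmasklist = []
-- 	entry = 0
-- 	for i in range(len(fields) - 1, -1, -1):
-- 		mask = int(fields[i], 16)
-- 		while mask != 0:
-- 			if mask & 1:
-- 				bitmasklist.append(entry)
-- 			mask >>= 1
-- 			entry += 1
-- 	return bitmasklist
-- ===== SOURCE B (Python) =====
-- def bitmasklist(line):
-- 	fields = line.strip().split(",")
-- 	out = []
-- 	entry = 0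
-- 	for field in reversed(fields):
-- 		mask = int(field, 16)
-- 		width = mask.bit_length()
-- 		while mask != 0:
-- 			rest = mask & (mask - 1)   # clear the lowest set bit
-- 			low = mask - rest          # the lowest set bit, a power of two
-- 			out.append(entry + low.bit_length() - 1)
-- 			mask = rest
-- 		entry += width
-- 	return out
-- ===== Notes on version B (the rewrite author's own statement) =====
-- stated objective: alternative
-- what changed: B enumerates only the set bits of each field by repeatedly clearing the lowest set bit (mask & (mask-1)) and reading its position from bit_length, instead of A's bit-by-bit right-shift scan; the cross-field entry offset is advanced by the precomputed bit_length.
import Mathlib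
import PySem

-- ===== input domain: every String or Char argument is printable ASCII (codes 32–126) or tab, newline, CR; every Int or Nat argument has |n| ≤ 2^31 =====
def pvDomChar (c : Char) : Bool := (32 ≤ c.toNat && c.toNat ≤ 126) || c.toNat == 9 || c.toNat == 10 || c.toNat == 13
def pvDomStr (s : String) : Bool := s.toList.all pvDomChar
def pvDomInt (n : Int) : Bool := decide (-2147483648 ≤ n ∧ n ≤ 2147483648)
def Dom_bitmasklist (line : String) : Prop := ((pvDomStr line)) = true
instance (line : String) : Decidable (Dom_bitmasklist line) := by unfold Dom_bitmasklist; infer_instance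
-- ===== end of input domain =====

-- B enumerates only the set bits of each hex field by clearing the lowest set bit each step,
-- instead of A's one-position-at-a-time right-shift scan; same return value on all inputs where A returns.


-- ===== PORT A =====
-- inner while loop: mask scanned bit by bit (mask >>= 1, entry += 1); returns (list so far, entry).
-- The Nat mask is exact for int(field,16) ≥ 0; a negative mask makes Python's while loop diverge
-- and a ValueError leaves no return — both are excluded by Pre_bitmasklist.
def pvAScan (mask : Nat) (entry : Int) (acc : List Int) : List Int × Int :=
  if mask = 0 then (acc, entry)
  else pvAScan (mask / 2) (entry + 1) (if mask % 2 = 1 then acc ++ [entry] else acc)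
termination_by mask
decreasing_by exact Nat.div_lt_self (Nat.pos_of_ne_zero (by assumption)) (by norm_num)

-- for i in range(len(fields)-1, -1, -1): fields[i]  ⟶  fold over fields.reverse
def pvALoop : List String → Int → List Int → List Int
  | [], _, acc => acc
  | f :: rest, entry, acc =>
      let mask := ((PySem.Int.ofStrBase? f 16).getD 0).toNat
      let r := pvAScan mask entry acc
      pvALoop rest r.2 r.1

def bitmasklist (line : String) : List Int :=
  pvALoop (((PySem.Str.split? (PySem.Str.strip line) ",").getD [])).reverse 0 []

-- ===== PORT B =====
-- mask.bit_length() (hand helper, exact for Nat)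
def pvBitLength (n : Nat) : Nat :=
  if n = 0 then 0 else pvBitLength (n / 2) + 1
termination_by n
decreasing_by exact Nat.div_lt_self (Nat.pos_of_ne_zero (by assumption)) (by norm_num)

-- inner while loop of B: clear the lowest set bit each iteration
def pvBScan (mask : Nat) (entry : Int) (acc : List Int) : List Int :=
  if mask = 0 then acc
  else  -- rest = mask & (mask-1); low = mask - rest
    pvBScan (mask &&& (mask - 1)) entry
      (acc ++ [entry + (pvBitLength (mask - (mask &&& (mask - 1))) : Int) - 1])
termination_by mask
decreasing_by
  exact Nat.lt_of_le_of_lt (Nat.and_le_right)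
    (Nat.sub_lt (Nat.pos_of_ne_zero (by assumption)) (by norm_num))

def pvBLoop : List String → Int → List Int → List Int
  | [], _, acc => acc
  | f :: rest, entry, acc =>
      let mask := ((PySem.Int.ofStrBase? f 16).getD 0).toNat
      pvBLoop rest (entry + (pvBitLength mask : Int)) (pvBScan mask entry acc)

def bitmasklist_alt (line : String) : List Int :=
  pvBLoop (((PySem.Str.split? (PySem.Str.strip line) ",").getD [])).reverse 0 []

-- ===== PRECONDITION & SPEC =====
-- Pre_ admits exactly the inputs on which Python A returns: every comma field parses as a
-- base-16 int (else int(field,16) raises ValueError) and parses nonnegative (a negative mask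
-- makes A's while loop run forever).
def Pre_bitmasklist (line : String) : Prop :=
  ((((PySem.Str.split? (PySem.Str.strip line) ",").getD [])).all
    (fun f => match PySem.Int.ofStrBase? f 16 with
              | some m => decide (0 ≤ m)
              | none => false)) = true
instance (line : String) : Decidable (Pre_bitmasklist line) := by unfold Pre_bitmasklist; infer_instance
def pvWitness_bitmasklist : String := "3,0,f"
def Spec_bitmasklist (line : String) (out : List Int) : Prop := out = bitmasklist_alt line
instance (line : String) (out : List Int) : Decidable (Spec_bitmasklist line out) := by unfold Spec_bitmasklist; infer_instance

-- ===== CLAIM (what is proved, stated in full; the proofs are below) =====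
def Claim_equal_bitmasklist : Prop := ∀ (line : String), Dom_bitmasklist line → Pre_bitmasklist line → Spec_bitmasklist line (bitmasklist line)

-- ===== LEMMAS AND PROOFS =====

theorem pvAScan_snd (mask : Nat) : ∀ (entry : Int) (acc : List Int),
    (pvAScan mask entry acc).2 = entry + (pvBitLength mask : Nat) := by
  induction mask using Nat.strong_induction_on with
  | _ mask ih =>
    intro entry acc
    rw [pvAScan, pvBitLength]
    by_cases h : mask = 0
    · simp [h]
    · simp only [if_neg h]
      rw [ih (mask / 2) (Nat.div_lt_self (Nat.pos_of_ne_zero h) (by norm_num))]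
      push_cast
      ring

theorem pv_odd_and (k : Nat) : (2 * k + 1) &&& (2 * k) = 2 * k := by
  have h1 : 2 * k + 1 = Nat.bit true k := by simp [Nat.bit]
  have h2 : 2 * k = Nat.bit false k := by simp [Nat.bit]
  rw [h1, h2, Nat.land_bit]
  simp [Nat.bit]

theorem pv_even_and (k : Nat) (hk : k ≠ 0) :
    (2 * k) &&& (2 * k - 1) = 2 * (k &&& (k - 1)) := by
  have h1 : 2 * k = Nat.bit false k := by simp [Nat.bit]
  have h2 : 2 * k - 1 = Nat.bit true (k - 1) := by
    simp [Nat.bit]; omega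
  rw [h2, h1, Nat.land_bit]
  simp [Nat.bit]

theorem pvBitLength_two_mul (x : Nat) (hx : x ≠ 0) :
    pvBitLength (2 * x) = pvBitLength x + 1 := by
  rw [pvBitLength]
  simp only [if_neg (by omega : ¬ 2 * x = 0)]
  congr 1
  congr 1
  omega

theorem pvBScan_even (k : Nat) : ∀ (entry : Int) (acc : List Int),
    pvBScan (2 * k) entry acc = pvBScan k (entry + 1) acc := by
  induction k using Nat.strong_induction_on with
  | _ k ih =>
    intro entry acc
    by_cases h : k = 0
    · subst h
      simp [pvBScan]
    · have hr : k &&& (k - 1) < k :=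
        Nat.lt_of_le_of_lt Nat.and_le_right (Nat.sub_lt (Nat.pos_of_ne_zero h) (by norm_num))
      have hlow : k - (k &&& (k - 1)) ≠ 0 := by omega
      conv_lhs => rw [pvBScan]
      conv_rhs => rw [pvBScan]
      rw [if_neg (by omega : ¬ 2 * k = 0), if_neg h]
      rw [pv_even_and k h]
      rw [(by omega : 2 * k - 2 * (k &&& (k - 1)) = 2 * (k - (k &&& (k - 1))))]
      rw [pvBitLength_two_mul _ hlow]
      rw [ih (k &&& (k - 1)) hr]
      have hval : entry + ((pvBitLength (k - (k &&& (k - 1))) + 1 : Nat) : Int) - 1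
          = entry + 1 + ((pvBitLength (k - (k &&& (k - 1))) : Nat) : Int) - 1 := by
        push_cast; ring
      rw [hval]

theorem pvBScan_odd (k : Nat) (entry : Int) (acc : List Int) :
    pvBScan (2 * k + 1) entry acc = pvBScan (2 * k) entry (acc ++ [entry]) := by
  conv_lhs => rw [pvBScan]
  rw [if_neg (by omega : ¬ 2 * k + 1 = 0)]
  rw [(by omega : 2 * k + 1 - 1 = 2 * k), pv_odd_and]
  rw [(by omega : 2 * k + 1 - 2 * k = 1)]
  have h3 : pvBitLength 1 = 1 := by
    rw [pvBitLength]; norm_num; rw [pvBitLength]; simp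
  rw [h3]
  norm_num

theorem pvScan_eq (mask : Nat) : ∀ (entry : Int) (acc : List Int),
    (pvAScan mask entry acc).1 = pvBScan mask entry acc := by
  induction mask using Nat.strong_induction_on with
  | _ mask ih =>
    intro entry acc
    by_cases h : mask = 0
    · subst h; rw [pvAScan, pvBScan]; simp
    · have hlt : mask / 2 < mask := Nat.div_lt_self (Nat.pos_of_ne_zero h) (by norm_num)
      rw [pvAScan, if_neg h]
      by_cases hm : mask % 2 = 1
      · rw [if_pos hm, ih (mask / 2) hlt]
        conv_rhs => rw [(by omega : mask = 2 * (mask / 2) + 1)]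
        rw [pvBScan_odd, pvBScan_even]
      · rw [if_neg hm, ih (mask / 2) hlt]
        conv_rhs => rw [(by omega : mask = 2 * (mask / 2))]
        rw [pvBScan_even]

theorem pvLoop_eq (fields : List String) : ∀ (entry : Int) (acc : List Int),
    pvALoop fields entry acc = pvBLoop fields entry acc := by
  induction fields with
  | nil => intro entry acc; rfl
  | cons f rest ih =>
    intro entry acc
    rw [pvALoop, pvBLoop]
    simp only [pvScan_eq, pvAScan_snd]
    exact ih _ _

-- ===== VERDICT (by name: the statement is the Claim_ definition above) =====
theorem bitmasklist_spec : Claim_equal_bitmasklist := by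
  intro line _ _
  unfold Spec_bitmasklist bitmasklist bitmasklist_alt
  exact pvLoop_eq _ _ _
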